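-- pv_equiv track=rewrite | github.com/Aratz/AdventOfCode | 2019/src/bin/day03a.py | convert_to_coordinates
-- ===== SOURCE A (Python) =====
-- def convert_to_coordinates(moves, start=(0, 0)):
--     res = [start]
--     for move in moves:
--         current_pos = res[-1]
--         direction = move[0]
--         dist = int(move[1:]) * (1 if direction in ['R', 'U'] else -1)
--         res.append(
--                 (
--                     current_pos[0] + (dist if direction in ['L', 'R'] else 0),
--                     current_pos[1] + (dist if direction in ['U', 'D'] else 0),
--                 )
--             )
--     return res
-- ===== SOURCE B (Python) =====
-- def convert_to_coordinates(moves, start=(0, 0)):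
--     def axis_deltas(pos, neg):
--         return [int(m[1:]) * ((m[0] == pos) - (m[0] == neg)) for m in moves]
--
--     def prefix_sums(s0, deltas):
--         sums = [s0] * (len(deltas) + 1)
--         for i, d in enumerate(deltas):
--             sums[i + 1] = sums[i] + d
--         return sums
--
--     xs = prefix_sums(start[0], axis_deltas('R', 'L'))
--     ys = prefix_sums(start[1], axis_deltas('U', 'D'))
--     return list(zip(xs, ys))
-- ===== Notes on version B (the rewrite author's own statement) =====
-- stated objective: alternative
-- what changed: B switches to a structure-of-arrays layout: it builds two independent per-axis delta lists, turns each into a prefix-sum array by index, and zips the x and y arrays into the waypoint list, instead of A's single walk over coordinate pairs that re-reads res[-1].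
import Mathlib
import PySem

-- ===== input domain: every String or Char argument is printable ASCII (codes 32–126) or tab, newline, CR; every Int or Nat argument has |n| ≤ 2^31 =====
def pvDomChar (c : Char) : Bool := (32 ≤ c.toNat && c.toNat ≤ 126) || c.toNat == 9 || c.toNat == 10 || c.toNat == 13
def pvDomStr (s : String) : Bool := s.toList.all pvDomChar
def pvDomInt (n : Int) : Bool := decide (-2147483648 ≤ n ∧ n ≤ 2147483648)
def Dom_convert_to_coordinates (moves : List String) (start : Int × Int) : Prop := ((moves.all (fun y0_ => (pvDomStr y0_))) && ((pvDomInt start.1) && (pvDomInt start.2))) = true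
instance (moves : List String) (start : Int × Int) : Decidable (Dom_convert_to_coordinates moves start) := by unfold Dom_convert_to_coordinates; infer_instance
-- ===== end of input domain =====

-- B uses a structure-of-arrays layout (per-axis delta lists, per-axis prefix sums, zipped); equal return values on Pre_ (moves parseable).

-- ===== PORT A =====
-- one loop iteration of A: read res[-1], parse, append the new waypoint
def ctcStep (res : List (Int × Int)) (move : String) : List (Int × Int) :=
  let current_pos := (PySem.List.pyGet? res (-1)).getD (0, 0)   -- res is never empty; Pre_ excludes parse failures
  let cs := move.toList
  let direction := cs.headD ' '                                  -- move[0]; Pre_ excludes the empty-string IndexError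
  let dist := (PySem.Int.ofChars? (cs.drop 1)).getD 0 *
              (if direction = 'R' ∨ direction = 'U' then 1 else -1)
  res ++ [(current_pos.1 + (if direction = 'L' ∨ direction = 'R' then dist else 0),
           current_pos.2 + (if direction = 'U' ∨ direction = 'D' then dist else 0))]

def convert_to_coordinates (moves : List String) (start : Int × Int) : List (Int × Int) :=
  moves.foldl ctcStep [start]

-- ===== PORT B =====
-- Source B's axis_deltas: signed delta of one move along the axis with positive letter pos, negative letter neg
def ctcAxisDelta (pos neg : Char) (m : String) : Int :=
  (PySem.Int.ofChars? (m.toList.drop 1)).getD 0 *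
    ((if m.toList.headD ' ' = pos then (1 : Int) else 0) - (if m.toList.headD ' ' = neg then 1 else 0))

-- Source B's prefix_sums loop: sums[i+1] = sums[i] + d
def ctcPrefixSums (s0 : Int) : List Int → List Int
  | [] => [s0]
  | d :: ds => s0 :: ctcPrefixSums (s0 + d) ds

def convert_to_coordinates_alt (moves : List String) (start : Int × Int) : List (Int × Int) :=
  List.zip (ctcPrefixSums start.1 (moves.map (ctcAxisDelta 'R' 'L')))
           (ctcPrefixSums start.2 (moves.map (ctcAxisDelta 'U' 'D')))

-- ===== PRECONDITION & SPEC =====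
-- Pre_ excludes exactly the inputs where Python A raises: an empty move string (IndexError on
-- move[0]) or move[1:] not parseable by int() (ValueError).
def Pre_convert_to_coordinates (moves : List String) (start : Int × Int) : Prop :=
  ∀ move ∈ moves, move.toList ≠ [] ∧ (PySem.Int.ofChars? (move.toList.drop 1)).isSome
instance (moves : List String) (start : Int × Int) : Decidable (Pre_convert_to_coordinates moves start) := by unfold Pre_convert_to_coordinates; infer_instance
def pvWitness_convert_to_coordinates : List String × (Int × Int) := (["R2", "U3", "L10", "D4"], (1, -2))

def Spec_convert_to_coordinates (moves : List String) (start : Int × Int) (out : List (Int × Int)) : Prop := out = convert_to_coordinates_alt moves start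
instance (moves : List String) (start : Int × Int) (out : List (Int × Int)) : Decidable (Spec_convert_to_coordinates moves start out) := by unfold Spec_convert_to_coordinates; infer_instance

-- ===== CLAIM (what is proved, stated in full; the proofs are below) =====
def Claim_equal_convert_to_coordinates : Prop := ∀ (moves : List String) (start : Int × Int), Dom_convert_to_coordinates moves start → Pre_convert_to_coordinates moves start → Spec_convert_to_coordinates moves start (convert_to_coordinates moves start)

-- ===== LEMMAS AND PROOFS =====

-- proof-only helper: the per-move pair walk both sides reduce to
def ctcWalk (p : Int × Int) : List String → List (Int × Int)
  | [] => []
  | m :: ms =>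
      let q := (p.1 + ctcAxisDelta 'R' 'L' m, p.2 + ctcAxisDelta 'U' 'D' m)
      q :: ctcWalk q ms

theorem pyGet_last (acc : List (Int × Int)) (p : Int × Int) :
    PySem.List.pyGet? (acc ++ [p]) (-1) = some p := by
  simp [PySem.List.pyGet?, PySem.List.pyIdx?]

theorem ctcStep_eq (acc : List (Int × Int)) (p : Int × Int) (move : String) :
    ctcStep (acc ++ [p]) move
      = (acc ++ [p]) ++ [(p.1 + ctcAxisDelta 'R' 'L' move, p.2 + ctcAxisDelta 'U' 'D' move)] := by
  simp only [ctcStep, ctcAxisDelta, pyGet_last, Option.getD_some]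
  by_cases hR : move.toList.headD ' ' = 'R' <;>
  by_cases hL : move.toList.headD ' ' = 'L' <;>
  by_cases hU : move.toList.headD ' ' = 'U' <;>
  by_cases hD : move.toList.headD ' ' = 'D' <;>
    simp_all

theorem foldl_ctcStep (moves : List String) (acc : List (Int × Int)) (p : Int × Int) :
    moves.foldl ctcStep (acc ++ [p]) = (acc ++ [p]) ++ ctcWalk p moves := by
  induction moves generalizing acc p with
  | nil => simp [ctcWalk]
  | cons m ms ih =>
      simp only [List.foldl_cons, ctcStep_eq, ctcWalk]
      rw [show acc ++ [p] ++ [(p.1 + ctcAxisDelta 'R' 'L' m, p.2 + ctcAxisDelta 'U' 'D' m)]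
            = (acc ++ [p]) ++ [(p.1 + ctcAxisDelta 'R' 'L' m, p.2 + ctcAxisDelta 'U' 'D' m)] from rfl, ih]
      simp

theorem zip_prefixSums (moves : List String) (x y : Int) :
    List.zip (ctcPrefixSums x (moves.map (ctcAxisDelta 'R' 'L')))
             (ctcPrefixSums y (moves.map (ctcAxisDelta 'U' 'D')))
      = (x, y) :: ctcWalk (x, y) moves := by
  induction moves generalizing x y with
  | nil => simp [ctcPrefixSums, ctcWalk]
  | cons m ms ih =>
      simp only [List.map_cons, ctcPrefixSums, ctcWalk, List.zip_cons_cons, ih]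

-- ===== VERDICT (by name: the statement is the Claim_ definition above) =====
theorem convert_to_coordinates_spec : Claim_equal_convert_to_coordinates := by
  intro moves start _ _
  unfold Spec_convert_to_coordinates convert_to_coordinates convert_to_coordinates_alt
  rw [zip_prefixSums moves start.1 start.2]
  have := foldl_ctcStep moves [] start
  simpa using this
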